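-- pv_equiv track=rewrite | github.com/nghilethanh09052000/Dagster-Data-Pipeline-For-Political- | contributions_pipeline/ingestion/states/delaware/assets.py | _map_xlsx_columns_to_standard_headers
-- ===== SOURCE A (Python) =====
-- def _map_xlsx_columns_to_standard_headers(headers: list[str]) -> dict[str, int]:
--     """
--     Map XLSX column headers to our simplified DE_CANDIDATES_HEADERS.
--     Returns a mapping of our standard header names to column indices.
--     """
--     mapping = {}
--
--     # Clean headers for comparison
--     clean_headers = [str(h).strip() for h in headers]
--
--     # Use the exact working logic from index.py
--     column_mapping_dict = {
--         "name": ["BallotName"],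
--         "address": [
--             "Residential_Address_Line_1",
--             "Mailing_Address_Line_1",
--             "Address_Line1",
--             "Address_Line_1",
--             "Address_Line2",
--         ],
--         "party": ["Party", "Fills_term_Balance", "Fills_Term_Balance"],
--         "date_filed": ["Filing Date"],
--         "phone": ["Phone_Number_1", "Phone_Number_2", "Phone_Number"],
--     }
--
--     # Find matching columns for each standard header
--     for standard_header, possible_xlsx_headers in column_mapping_dict.items():
--         mapping[standard_header] = -1  # Default to not found
--
--         # Look for any of the possible XLSX headers that map to this standard header
--         for xlsx_header in possible_xlsx_headers:
--             for i, header in enumerate(clean_headers):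
--                 if header == xlsx_header:  # Use exact string matching like index.py
--                     mapping[standard_header] = i
--                     break
--             if mapping[standard_header] != -1:
--                 break
--
--     # Special handling for address columns - we need both Line1 and Line2 if they exist
--     address_line1_idx = -1
--     address_line2_idx = -1
--
--     for i, header in enumerate(clean_headers):
--         if header == "Address_Line1" or header == "Address_Line_1":
--             address_line1_idx = i
--         elif header == "Address_Line2":
--             address_line2_idx = i
--
--     # Store both indices for address processing
--     mapping["address_line1"] = address_line1_idx
--     mapping["address_line2"] = address_line2_idx
--
--     return mapping
-- ===== SOURCE B (Python) =====
-- def _map_xlsx_columns_to_standard_headers(headers: list[str]) -> dict[str, int]: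
--     """Inverted-index single pass: a reverse map candidate->(standard key, priority)
--     drives ONE scan of the headers, keeping per key the lowest-priority match at its
--     first index; address line1/line2 last-occurrence trackers ride the same scan."""
--     clean_headers = [str(h).strip() for h in headers]
--
--     column_mapping_dict = {
--         "name": ["BallotName"],
--         "address": [
--             "Residential_Address_Line_1",
--             "Mailing_Address_Line_1",
--             "Address_Line1",
--             "Address_Line_1",
--             "Address_Line2",
--         ],
--         "party": ["Party", "Fills_term_Balance", "Fills_Term_Balance"],
--         "date_filed": ["Filing Date"],
--         "phone": ["Phone_Number_1", "Phone_Number_2", "Phone_Number"],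
--     }
--
--     reverse = {}
--     for standard_header, candidates in column_mapping_dict.items():
--         for priority, candidate in enumerate(candidates):
--             reverse[candidate] = (standard_header, priority)
--
--     best = {}
--     address_line1_idx = -1
--     address_line2_idx = -1
--     for i, h in enumerate(clean_headers):
--         hit = reverse.get(h)
--         if hit is not None:
--             key, priority = hit
--             if key not in best or priority < best[key][0]:
--                 best[key] = (priority, i)
--         if h == "Address_Line1" or h == "Address_Line_1":
--             address_line1_idx = i
--         elif h == "Address_Line2":
--             address_line2_idx = i
--
--     mapping = {k: (best[k][1] if k in best else -1) for k in column_mapping_dict}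
--     mapping["address_line1"] = address_line1_idx
--     mapping["address_line2"] = address_line2_idx
--     return mapping
-- ===== Notes on version B (the rewrite author's own statement) =====
-- stated objective: faster
-- what changed: Inverts the traversal: instead of A's candidate-driven repeated rescans of the header list, B builds a reverse map candidate->(standard key, priority) and makes ONE data-driven pass over the headers, keeping per standard key the lowest-priority hit at its first index (and the last-occurrence address trackers in the same pass), then emits the mapping in the fixed key order.
import Mathlib
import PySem

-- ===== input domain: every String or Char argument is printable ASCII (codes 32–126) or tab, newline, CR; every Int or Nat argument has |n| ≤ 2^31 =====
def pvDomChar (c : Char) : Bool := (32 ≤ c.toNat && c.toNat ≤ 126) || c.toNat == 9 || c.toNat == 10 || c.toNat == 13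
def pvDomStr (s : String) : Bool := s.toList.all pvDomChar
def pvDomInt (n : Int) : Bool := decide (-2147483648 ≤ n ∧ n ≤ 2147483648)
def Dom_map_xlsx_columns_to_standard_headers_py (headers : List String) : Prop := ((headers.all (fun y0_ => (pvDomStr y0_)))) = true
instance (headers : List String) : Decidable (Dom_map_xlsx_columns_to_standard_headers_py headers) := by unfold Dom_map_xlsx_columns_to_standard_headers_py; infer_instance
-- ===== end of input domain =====

-- B inverts the traversal: a candidate->(key, priority) reverse map drives one pass over the headers instead of A's per-candidate rescans (alternative structure, same result).

-- ===== PORT A =====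
-- inner 'for i, header in enumerate(clean_headers): if header == xlsx_header: break' scan
def pvScanA (l : List String) (x : String) (i : Int) : Int :=
  match l with
  | [] => -1
  | h :: t => if h = x then i else pvScanA t x (i + 1)

-- 'for xlsx_header in possible_xlsx_headers: … if mapping[standard_header] != -1: break'
def pvCandA (clean : List String) (cands : List String) : Int :=
  match cands with
  | [] => -1
  | c :: rest =>
    let idx := pvScanA clean c 0
    if idx ≠ -1 then idx else pvCandA clean rest

-- the special address loop: last occurrence of Address_Line1/_1, elif Address_Line2
def pvAddrA (l : List String) (i l1 l2 : Int) : Int × Int :=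
  match l with
  | [] => (l1, l2)
  | h :: t =>
    if h = "Address_Line1" ∨ h = "Address_Line_1" then pvAddrA t (i + 1) i l2
    else if h = "Address_Line2" then pvAddrA t (i + 1) l1 i
    else pvAddrA t (i + 1) l1 l2

def pvCmd : List (String × List String) :=
  [("name", ["BallotName"]),
   ("address", ["Residential_Address_Line_1", "Mailing_Address_Line_1", "Address_Line1", "Address_Line_1", "Address_Line2"]),
   ("party", ["Party", "Fills_term_Balance", "Fills_Term_Balance"]),
   ("date_filed", ["Filing Date"]),
   ("phone", ["Phone_Number_1", "Phone_Number_2", "Phone_Number"])]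

def map_xlsx_columns_to_standard_headers_py (headers : List String) : List (String × Int) :=
  let clean := headers.map PySem.Str.strip
  let mapping := pvCmd.foldl (fun (d : PySem.Dict String Int) p => d.insert p.1 (pvCandA clean p.2)) PySem.Dict.empty
  let addr := pvAddrA clean 0 (-1) (-1)
  ((mapping.insert "address_line1" addr.1).insert "address_line2" addr.2).items

-- ===== PORT B =====
-- reverse = {candidate: (standard_header, priority)} built from column_mapping_dict
def pvRev : PySem.Dict String (String × Int) :=
  pvCmd.foldl (fun (d : PySem.Dict String (String × Int)) p =>
    ((PySem.List.enumerate p.2).foldl (fun (d : PySem.Dict String (String × Int)) q => d.insert q.2 (p.1, q.1)) d)) PySem.Dict.empty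

-- the single pass: best[key] = (priority, index) kept at strictly lower priority; address trackers ride along
def pvPassB (l : List String) (i : Int) (best : PySem.Dict String (Int × Int)) (l1 l2 : Int) :
    PySem.Dict String (Int × Int) × Int × Int :=
  match l with
  | [] => (best, l1, l2)
  | h :: t =>
    let best' :=
      match pvRev.get? h with
      | some kp =>
        match best.get? kp.1 with
        | none => best.insert kp.1 (kp.2, i)
        | some pj => if kp.2 < pj.1 then best.insert kp.1 (kp.2, i) else best
      | none => best
    if h = "Address_Line1" ∨ h = "Address_Line_1" then pvPassB t (i + 1) best' i l2
    else if h = "Address_Line2" then pvPassB t (i + 1) best' l1 i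
    else pvPassB t (i + 1) best' l1 l2

def map_xlsx_columns_to_standard_headers_py_alt (headers : List String) : List (String × Int) :=
  let clean := headers.map PySem.Str.strip
  let st := pvPassB clean 0 PySem.Dict.empty (-1) (-1)
  let mapping := pvCmd.foldl (fun (d : PySem.Dict String Int) p =>
    d.insert p.1 (match st.1.get? p.1 with | some pj => pj.2 | none => -1)) PySem.Dict.empty
  ((mapping.insert "address_line1" st.2.1).insert "address_line2" st.2.2).items

-- ===== PRECONDITION & SPEC =====
def Spec_map_xlsx_columns_to_standard_headers_py (headers : List String) (out : List (String × Int)) : Prop := out = map_xlsx_columns_to_standard_headers_py_alt headers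
instance (headers : List String) (out : List (String × Int)) : Decidable (Spec_map_xlsx_columns_to_standard_headers_py headers out) := by unfold Spec_map_xlsx_columns_to_standard_headers_py; infer_instance

-- ===== CLAIM (what is proved, stated in full; the proofs are below) =====
def Claim_equal_map_xlsx_columns_to_standard_headers_py : Prop := ∀ (headers : List String), Dom_map_xlsx_columns_to_standard_headers_py headers → Spec_map_xlsx_columns_to_standard_headers_py headers (map_xlsx_columns_to_standard_headers_py headers)

-- ===== LEMMAS AND PROOFS =====

-- proof-only helpers: the per-key projection of the single pass
def projRev (k : String) (h : String) : Option Int :=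
  match pvRev.get? h with
  | some kp => if kp.1 = k then some kp.2 else none
  | none => none

-- first index of h in a candidate list (the priority reverse[h] would store for this key)
def idxIn (cands : List String) (h : String) : Option Int :=
  match cands with
  | [] => none
  | c :: r => if h = c then some 0 else (idxIn r h).map (· + 1)

-- per-key evolution of best[k] along the pass
def pvUpd (f : String → Option Int) (l : List String) (i : Int) (s : Option (Int × Int)) :
    Option (Int × Int) :=
  match l with
  | [] => s
  | h :: t =>
    pvUpd f t (i + 1)
      (match f h, s with
       | some p, none => some (p, i)
       | some p, some pj => if p < pj.1 then some (p, i) else some pj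
       | none, s => s)

def pvResolve (s : Option (Int × Int)) : Int :=
  match s with
  | none => -1
  | some pj => pj.2

-- A's candidate loop with an explicit scan base
def pvCandAi (cands clean : List String) (i : Int) : Int :=
  match cands with
  | [] => -1
  | c :: r =>
    let idx := pvScanA clean c i
    if idx ≠ -1 then idx else pvCandAi r clean i

theorem pvCandA_eq_i (clean cands : List String) : pvCandA clean cands = pvCandAi cands clean 0 := by
  induction cands with
  | nil => rfl
  | cons c r ih => simp only [pvCandA, pvCandAi, ih]

theorem pvUpd_congr (f g : String → Option Int) (hfg : ∀ h, f h = g h) (l : List String) :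
    ∀ i s, pvUpd f l i s = pvUpd g l i s := by
  induction l with
  | nil => intro i s; rfl
  | cons h t ih => intro i s; simp only [pvUpd, hfg h]; exact ih _ _

-- projection of the pass through the dict
theorem pvPassB_get (l : List String) (k : String) :
    ∀ (i : Int) (best : PySem.Dict String (Int × Int)) (l1 l2 : Int),
    (pvPassB l i best l1 l2).1.get? k = pvUpd (projRev k) l i (best.get? k) := by
  induction l with
  | nil => intro i best l1 l2; rfl
  | cons h t ih =>
    intro i best l1 l2
    have key : ∀ l1' l2',
        (pvPassB t (i + 1)
          (match pvRev.get? h with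
           | some kp =>
             match best.get? kp.1 with
             | none => best.insert kp.1 (kp.2, i)
             | some pj => if kp.2 < pj.1 then best.insert kp.1 (kp.2, i) else best
           | none => best) l1' l2').1.get? k =
        pvUpd (projRev k) (h :: t) i (best.get? k) := by
      intro l1' l2'
      rw [ih]
      cases hr : pvRev.get? h with
      | none =>
        have hp : projRev k h = none := by simp [projRev, hr]
        simp only [pvUpd, hp]
      | some kp =>
        by_cases hk : kp.1 = k
        · have hp : projRev k h = some kp.2 := by simp [projRev, hr, hk]
          subst hk
          simp only [pvUpd, hp]
          cases hb : best.get? kp.1 with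
          | none => simp only [PySem.Dict.get?_insert_self]
          | some pj =>
            by_cases hlt : kp.2 < pj.1
            · simp only [if_pos hlt, PySem.Dict.get?_insert_self]
            · simp only [if_neg hlt, hb]
        · have hp : projRev k h = none := by simp [projRev, hr, hk]
          simp only [pvUpd, hp]
          cases hb : best.get? kp.1 with
          | none =>
            show pvUpd (projRev k) t (i + 1) ((best.insert kp.1 (kp.2, i)).get? k) =
              pvUpd (projRev k) t (i + 1) (best.get? k)
            rw [PySem.Dict.get?_insert_of_ne _ _ (Ne.symm hk)]
          | some pj =>
            show pvUpd (projRev k) t (i + 1)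
                ((if kp.2 < pj.1 then best.insert kp.1 (kp.2, i) else best).get? k) =
              pvUpd (projRev k) t (i + 1) (best.get? k)
            by_cases hlt : kp.2 < pj.1
            · rw [if_pos hlt, PySem.Dict.get?_insert_of_ne _ _ (Ne.symm hk)]
            · rw [if_neg hlt]
    simp only [pvPassB]
    split_ifs <;> exact key _ _
  
-- the last-occurrence trackers of the pass equal A's dedicated address loop
theorem pvPassB_addr (l : List String) :
    ∀ (i : Int) (best : PySem.Dict String (Int × Int)) (l1 l2 : Int),
    (pvPassB l i best l1 l2).2 = pvAddrA l i l1 l2 := by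
  induction l with
  | nil => intro i best l1 l2; rfl
  | cons h t ih =>
    intro i best l1 l2
    simp only [pvPassB, pvAddrA]
    split_ifs <;> apply ih

theorem idxIn_nonneg (cands : List String) (h : String) (p : Int) :
    idxIn cands h = some p → 0 ≤ p := by
  induction cands generalizing p with
  | nil => intro hc; simp [idxIn] at hc
  | cons c r ih =>
    intro hc
    simp only [idxIn] at hc
    split_ifs at hc
    · simp at hc; omega
    · cases hq : idxIn r h with
      | none => rw [hq] at hc; simp at hc
      | some q => rw [hq] at hc; simp at hc; have := ih q hq; omega

-- scan characterization
theorem pvScanA_eq_neg_iff (l : List String) (x : String) :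
    ∀ i : Int, 0 ≤ i → (pvScanA l x i = -1 ↔ x ∉ l) := by
  induction l with
  | nil => intro i hi; simp [pvScanA]
  | cons h t ih =>
    intro i hi
    simp only [pvScanA, List.mem_cons]
    by_cases hx : h = x
    · subst hx; simp; omega
    · rw [if_neg hx, ih (i + 1) (by omega)]
      constructor
      · intro hnm hor; rcases hor with he | hm
        · exact hx he.symm
        · exact hnm hm
      · intro hn hm; exact hn (Or.inr hm)

-- empty candidate list: the pass never updates
theorem pvUpd_none (l : List String) : ∀ i s, pvUpd (idxIn []) l i s = s := by
  induction l with
  | nil => intro i s; rfl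
  | cons h t ih => intro i s; simp only [pvUpd, idxIn]; exact ih _ _

-- priority-0 state is final
theorem pvUpd_zero (cands l : List String) :
    ∀ (i m : Int), pvUpd (idxIn cands) l i (some (0, m)) = some (0, m) := by
  induction l with
  | nil => intro i m; rfl
  | cons h t ih =>
    intro i m
    simp only [pvUpd]
    cases hf : idxIn cands h with
    | none => exact ih _ _
    | some p =>
      have hp := idxIn_nonneg cands h p hf
      show pvUpd (idxIn cands) t (i + 1) (if p < (0:Int) then some (p, i) else some (0, m)) = some (0, m)
      rw [if_neg (by omega)]
      exact ih _ _

def pvShift (s : Option (Int × Int)) : Option (Int × Int) :=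
  match s with
  | none => none
  | some pj => some (pj.1 + 1, pj.2)

-- when c never occurs, the (c :: r)-pass is the r-pass with priorities shifted up
theorem pvUpd_shift (c : String) (r : List String) (l : List String) (hc : c ∉ l) :
    ∀ i s, pvUpd (idxIn (c :: r)) l i (pvShift s) = pvShift (pvUpd (idxIn r) l i s) := by
  induction l with
  | nil => intro i s; rfl
  | cons h t ih =>
    have hh : h ≠ c := fun he => hc (he ▸ List.mem_cons_self ..)
    have ht : c ∉ t := fun hm => hc (List.mem_cons_of_mem _ hm)
    intro i s
    simp only [pvUpd, idxIn, if_neg hh]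
    cases hf : idxIn r h with
    | none =>
      simp only [Option.map_none]
      exact ih ht _ _
    | some p =>
      simp only [Option.map_some]
      cases s with
      | none => exact ih ht _ (some (p, i))
      | some pj =>
        simp only [pvShift]
        by_cases hlt : p < pj.1
        · rw [if_pos (by omega), if_pos hlt]
          exact ih ht _ (some (p, i))
        · rw [if_neg (by omega), if_neg hlt]
          exact ih ht _ (some pj)

-- invariant: positive-priority (or empty) state + c occurs later ⇒ result is the first index of c
theorem pvUpd_hit (c : String) (r : List String) (l : List String) :
    ∀ (i : Int) (s : Option (Int × Int)), 0 ≤ i →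
    (s = none ∨ ∃ p j, 1 ≤ p ∧ s = some (p, j)) → c ∈ l →
    pvResolve (pvUpd (idxIn (c :: r)) l i s) = pvScanA l c i := by
  induction l with
  | nil => intro i s hi hq hm; cases hm
  | cons h t ih =>
    intro i s hi hq hm
    simp only [pvUpd, pvScanA]
    by_cases hh : h = c
    · subst hh
      rw [if_pos rfl]
      have hstep : (match idxIn (h :: r) h, s with
          | some p, none => some (p, i)
          | some p, some pj => if p < pj.1 then some (p, i) else some pj
          | none, s => s) = some (0, i) := by
        simp only [idxIn]
        rcases hq with h1 | ⟨p, j, hp, h2⟩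
        · subst h1; rfl
        · subst h2
          show (if (0:Int) < (p, j).1 then (some ((0:Int), i) : Option (Int × Int)) else some (p, j)) = some (0, i)
          rw [if_pos (show (0:Int) < (p, j).1 by show (0:Int) < p; omega)]
      rw [hstep, pvUpd_zero]
      rfl
    · rw [if_neg hh]
      have hm' : c ∈ t := (List.mem_cons.mp hm).resolve_left (fun he => hh he.symm)
      apply ih _ _ (by omega) _ hm'
      simp only [idxIn, if_neg hh]
      cases hf : idxIn r h with
      | none =>
        simp only [Option.map_none]
        exact hq
      | some p =>
        have hp := idxIn_nonneg r h p hf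
        simp only [Option.map_some]
        rcases hq with h1 | ⟨p0, j, hp0, h2⟩
        · subst h1; right; exact ⟨p + 1, i, by omega, rfl⟩
        · subst h2
          have hred : (match (some (p + 1) : Option Int), (some (p0, j) : Option (Int × Int)) with
              | some p, none => some (p, i)
              | some p, some pj => if p < pj.1 then some (p, i) else some pj
              | none, s => s) =
              if p + 1 < p0 then some (p + 1, i) else some (p0, j) := rfl
          rw [hred]
          by_cases hlt : p + 1 < p0
          · rw [if_pos hlt]; right; exact ⟨p + 1, i, by omega, rfl⟩
          · rw [if_neg hlt]; right; exact ⟨p0, j, by omega, rfl⟩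

-- MAIN: the single pass resolves each key exactly like A's candidate loop
theorem pvUpd_main (cands : List String) :
    ∀ (clean : List String) (i : Int), 0 ≤ i →
    pvResolve (pvUpd (idxIn cands) clean i none) = pvCandAi cands clean i := by
  induction cands with
  | nil =>
    intro clean i hi
    rw [pvUpd_none]
    rfl
  | cons c r ih =>
    intro clean i hi
    simp only [pvCandAi]
    by_cases hm : c ∈ clean
    · have hs : pvScanA clean c i ≠ -1 := by
        intro he; exact (pvScanA_eq_neg_iff clean c i hi).mp he hm
      rw [if_pos hs]
      exact pvUpd_hit c r clean i none hi (Or.inl rfl) hm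
    · have hs : pvScanA clean c i = -1 := (pvScanA_eq_neg_iff clean c i hi).mpr hm
      rw [if_neg (by simp [hs])]
      have := pvUpd_shift c r clean hm i none
      simp only [pvShift] at this
      rw [this, ← ih clean i hi]
      cases pvUpd (idxIn r) clean i none <;> rfl

-- bridge: the literal reverse dict projected to each key IS idxIn of that key's candidate list
theorem pvRev_eq : pvRev = PySem.Dict.mk
    [("BallotName", ("name", 0)),
     ("Residential_Address_Line_1", ("address", 0)), ("Mailing_Address_Line_1", ("address", 1)),
     ("Address_Line1", ("address", 2)), ("Address_Line_1", ("address", 3)), ("Address_Line2", ("address", 4)),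
     ("Party", ("party", 0)), ("Fills_term_Balance", ("party", 1)), ("Fills_Term_Balance", ("party", 2)),
     ("Filing Date", ("date_filed", 0)),
     ("Phone_Number_1", ("phone", 0)), ("Phone_Number_2", ("phone", 1)), ("Phone_Number", ("phone", 2))] := by
  decide

-- bridge: the reverse dict projected to each key IS idxIn of that key's candidate list
theorem proj_all (h : String) :
    projRev "name" h = idxIn ["BallotName"] h ∧
    projRev "address" h = idxIn ["Residential_Address_Line_1", "Mailing_Address_Line_1", "Address_Line1", "Address_Line_1", "Address_Line2"] h ∧
    projRev "party" h = idxIn ["Party", "Fills_term_Balance", "Fills_Term_Balance"] h ∧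
    projRev "date_filed" h = idxIn ["Filing Date"] h ∧
    projRev "phone" h = idxIn ["Phone_Number_1", "Phone_Number_2", "Phone_Number"] h := by
  by_cases e1 : h = "BallotName"
  · subst e1; decide
  by_cases e2 : h = "Residential_Address_Line_1"
  · subst e2; decide
  by_cases e3 : h = "Mailing_Address_Line_1"
  · subst e3; decide
  by_cases e4 : h = "Address_Line1"
  · subst e4; decide
  by_cases e5 : h = "Address_Line_1"
  · subst e5; decide
  by_cases e6 : h = "Address_Line2"
  · subst e6; decide
  by_cases e7 : h = "Party"
  · subst e7; decide
  by_cases e8 : h = "Fills_term_Balance"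
  · subst e8; decide
  by_cases e9 : h = "Fills_Term_Balance"
  · subst e9; decide
  by_cases e10 : h = "Filing Date"
  · subst e10; decide
  by_cases e11 : h = "Phone_Number_1"
  · subst e11; decide
  by_cases e12 : h = "Phone_Number_2"
  · subst e12; decide
  by_cases e13 : h = "Phone_Number"
  · subst e13; decide
  have f1 : ¬ ("BallotName" : String) = h := fun he => e1 he.symm
  have f2 : ¬ ("Residential_Address_Line_1" : String) = h := fun he => e2 he.symm
  have f3 : ¬ ("Mailing_Address_Line_1" : String) = h := fun he => e3 he.symm
  have f4 : ¬ ("Address_Line1" : String) = h := fun he => e4 he.symm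
  have f5 : ¬ ("Address_Line_1" : String) = h := fun he => e5 he.symm
  have f6 : ¬ ("Address_Line2" : String) = h := fun he => e6 he.symm
  have f7 : ¬ ("Party" : String) = h := fun he => e7 he.symm
  have f8 : ¬ ("Fills_term_Balance" : String) = h := fun he => e8 he.symm
  have f9 : ¬ ("Fills_Term_Balance" : String) = h := fun he => e9 he.symm
  have f10 : ¬ ("Filing Date" : String) = h := fun he => e10 he.symm
  have f11 : ¬ ("Phone_Number_1" : String) = h := fun he => e11 he.symm
  have f12 : ¬ ("Phone_Number_2" : String) = h := fun he => e12 he.symm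
  have f13 : ¬ ("Phone_Number" : String) = h := fun he => e13 he.symm
  refine ⟨?_, ?_, ?_, ?_, ?_⟩ <;>
    simp [projRev, pvRev_eq, idxIn, PySem.Dict.get?, f1, f2, f3, f4, f5, f6, f7, f8, f9, f10, f11, f12, f13, e1, e2, e3, e4, e5, e6, e7, e8, e9, e10, e11, e12, e13]

theorem proj_name (h : String) : projRev "name" h = idxIn ["BallotName"] h := (proj_all h).1

theorem proj_address (h : String) : projRev "address" h =
    idxIn ["Residential_Address_Line_1", "Mailing_Address_Line_1", "Address_Line1", "Address_Line_1", "Address_Line2"] h := (proj_all h).2.1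

theorem proj_party (h : String) : projRev "party" h =
    idxIn ["Party", "Fills_term_Balance", "Fills_Term_Balance"] h := (proj_all h).2.2.1

theorem proj_date_filed (h : String) : projRev "date_filed" h = idxIn ["Filing Date"] h := (proj_all h).2.2.2.1

theorem proj_phone (h : String) : projRev "phone" h =
    idxIn ["Phone_Number_1", "Phone_Number_2", "Phone_Number"] h := (proj_all h).2.2.2.2

-- per key: B's final lookup equals A's candidate loop
theorem resolve_eq (clean : List String) (k : String) (cands : List String)
    (hk : ∀ h, projRev k h = idxIn cands h) :
    (match (pvPassB clean 0 PySem.Dict.empty (-1) (-1)).1.get? k with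
     | some pj => pj.2 | none => -1) = pvCandA clean cands := by
  rw [pvCandA_eq_i]
  rw [← pvUpd_main cands clean 0 (by omega)]
  rw [show (pvPassB clean 0 PySem.Dict.empty (-1) (-1)).1.get? k = pvUpd (idxIn cands) clean 0 none by
    rw [pvPassB_get, PySem.Dict.get?_empty]; exact pvUpd_congr _ _ hk clean 0 none]
  cases pvUpd (idxIn cands) clean 0 none <;> rfl

-- ===== VERDICT (by name: the statement is the Claim_ definition above) =====
theorem map_xlsx_columns_to_standard_headers_py_spec : Claim_equal_map_xlsx_columns_to_standard_headers_py := by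
  intro headers _
  unfold Spec_map_xlsx_columns_to_standard_headers_py
  unfold map_xlsx_columns_to_standard_headers_py map_xlsx_columns_to_standard_headers_py_alt
  simp only [pvCmd, List.foldl]
  rw [resolve_eq _ _ _ proj_name, resolve_eq _ _ _ proj_address, resolve_eq _ _ _ proj_party,
      resolve_eq _ _ _ proj_date_filed, resolve_eq _ _ _ proj_phone, pvPassB_addr]
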